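-- pv_equiv track=rewrite | github.com/gseverina/python-trainings | hackerrank/gaming_array.py | gaming_array1
-- ===== SOURCE A (Python) =====
-- def gaming_array1(arr):
--     # Write your code here
--     if not arr or len(arr) < 1:
--         return 'BOB'
--     player = 'BOB'
--     while True:
--         arr = arr[:arr.index(max(arr))]
--         if len(arr) > 0:
--             if player == 'BOB':
--                 player = 'ANDY'
--             else:
--                 player = 'BOB'
--         else:
--             return player
-- ===== SOURCE B (Python) =====
-- def gaming_array1(arr):
--     # One pass: count strict left-to-right maxima; winner decided by parity.
--     k = 0
--     cur = None
--     for x in arr: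
--         if cur is None or x > cur:
--             cur = x
--             k += 1
--     return 'ANDY' if k % 2 == 0 and k != 0 else 'BOB'
-- ===== Notes on version B (the rewrite author's own statement) =====
-- stated objective: faster
-- what changed: Replaces the repeated max/index/truncate loop with a single pass counting strict left-to-right maxima and deciding the winner by the count's parity.
import Mathlib
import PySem

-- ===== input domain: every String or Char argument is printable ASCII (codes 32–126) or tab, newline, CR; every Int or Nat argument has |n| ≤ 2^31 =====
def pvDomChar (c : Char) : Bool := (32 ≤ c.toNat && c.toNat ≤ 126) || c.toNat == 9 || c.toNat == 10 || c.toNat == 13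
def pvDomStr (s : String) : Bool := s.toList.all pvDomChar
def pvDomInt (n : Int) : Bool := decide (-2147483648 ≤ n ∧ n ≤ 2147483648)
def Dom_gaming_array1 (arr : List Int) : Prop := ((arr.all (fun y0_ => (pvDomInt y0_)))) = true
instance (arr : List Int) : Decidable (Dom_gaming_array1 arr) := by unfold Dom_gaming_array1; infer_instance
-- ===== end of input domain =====

-- B replaces A's repeated max/index/truncate loop with one pass counting strict
-- left-to-right maxima and deciding the winner by parity (objective: faster).

-- ===== PORT A =====
-- while True: arr = arr[:arr.index(max(arr))]; toggle player if arr nonempty else return.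
-- Fuel is only a totality guard: the array shrinks strictly each pass, so fuel = len+1
-- is never exhausted; max?/index? always return some on the nonempty arrays the loop sees.
def gamingLoopA : Nat → List Int → String → String
  | 0, _, player => player
  | fuel + 1, arr, player =>
    match PySem.List.max? arr (fun y => y) with
    | none => player
    | some mx =>
      match PySem.List.index? arr mx with
      | none => player
      | some idx =>
        let arr' := PySem.List.slice arr none (some (idx : Int))
        if arr'.length > 0 then
          gamingLoopA fuel arr' (if player == "BOB" then "ANDY" else "BOB")
        else player

def gaming_array1 (arr : List Int) : String :=
  if arr.isEmpty || decide (arr.length < 1) then "BOB"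
  else gamingLoopA (arr.length + 1) arr "BOB"

-- ===== PORT B =====
-- k = 0; cur = None; for x in arr: if cur is None or x > cur: cur = x; k += 1
def bCount (l : List Int) (cur : Option Int) (k : Nat) : Nat :=
  match l with
  | [] => k
  | x :: xs =>
    if (match cur with | none => true | some c => decide (c < x)) then bCount xs (some x) (k + 1)
    else bCount xs cur k

def gaming_array1_alt (arr : List Int) : String :=
  let k := bCount arr none 0
  if k % 2 == 0 && k != 0 then "ANDY" else "BOB"

-- ===== PRECONDITION & SPEC =====
def Spec_gaming_array1 (arr : List Int) (out : String) : Prop := out = gaming_array1_alt arr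
instance (arr : List Int) (out : String) : Decidable (Spec_gaming_array1 arr out) := by unfold Spec_gaming_array1; infer_instance

-- ===== CLAIM (what is proved, stated in full; the proofs are below) =====
def Claim_equal_gaming_array1 : Prop := ∀ (arr : List Int), Dom_gaming_array1 arr → Spec_gaming_array1 arr (gaming_array1 arr)

-- ===== LEMMAS AND PROOFS =====

-- accumulator lower bound
theorem bCount_le (l : List Int) : ∀ cur k, k ≤ bCount l cur k := by
  induction l with
  | nil => intro cur k; simp [bCount]
  | cons x xs ih =>
    intro cur k
    cases cur with
    | none =>
      simp only [bCount]
      split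
      · exact Nat.le_trans (Nat.le_succ k) (ih (some x) (k + 1))
      · exact ih none k
    | some c =>
      simp only [bCount]
      split
      · exact Nat.le_trans (Nat.le_succ k) (ih (some x) (k + 1))
      · exact ih (some c) k

-- once the running max is the global max, no further increments
theorem bCount_tail (suf : List Int) : ∀ (mx : Int) k, (∀ y ∈ suf, y ≤ mx) →
    bCount suf (some mx) k = k := by
  induction suf with
  | nil => intro mx k _; simp [bCount]
  | cons y ys ih =>
    intro mx k h
    have hy : y ≤ mx := h y (by simp)
    simp only [bCount]
    rw [if_neg (by simp; omega)]
    exact ih mx k (fun z hz => h z (by simp [hz]))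

-- splitting at the first occurrence of the global maximum adds exactly one increment
theorem bCount_split (pre : List Int) : ∀ (mx : Int) (suf : List Int) (cur : Option Int) k,
    (∀ y ∈ pre, y < mx) → (∀ y ∈ suf, y ≤ mx) → (∀ c, cur = some c → c < mx) →
    bCount (pre ++ mx :: suf) cur k = bCount pre cur k + 1 := by
  induction pre with
  | nil =>
    intro mx suf cur k _ hsuf hcur
    cases cur with
    | none => simp [bCount, bCount_tail suf mx (k + 1) hsuf]
    | some c =>
      have := hcur c rfl
      simp [bCount, this, bCount_tail suf mx (k + 1) hsuf]
  | cons x pre ih =>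
    intro mx suf cur k hpre hsuf hcur
    have hx : x < mx := hpre x (by simp)
    have hpre' : ∀ y ∈ pre, y < mx := fun y hy => hpre y (by simp [hy])
    cases cur with
    | none =>
      simp only [List.cons_append, bCount]
      split
      · exact ih mx suf (some x) (k + 1) hpre' hsuf (fun c hc => by cases hc; exact hx)
      · exact ih mx suf none k hpre' hsuf (fun c hc => by cases hc)
    | some c =>
      simp only [List.cons_append, bCount]
      split
      · exact ih mx suf (some x) (k + 1) hpre' hsuf (fun c hc => by cases hc; exact hx)
      · exact ih mx suf (some c) k hpre' hsuf hcur

-- the truncation loop is decided by the parity of the left-to-right-maxima count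
theorem loopA_eq (fuel : Nat) : ∀ (arr : List Int) (p : String),
    arr.length < fuel → arr ≠ [] → (p = "BOB" ∨ p = "ANDY") →
    gamingLoopA fuel arr p =
      (if bCount arr none 0 % 2 = 1 then p else (if p == "BOB" then "ANDY" else "BOB")) := by
  induction fuel with
  | zero => intro arr p h; omega
  | succ fuel ih =>
    intro arr p hlen hne hp
    obtain ⟨mx, hm⟩ : ∃ mx, PySem.List.max? arr (fun y => y) = some mx := by
      cases hmax : PySem.List.max? arr (fun y => y) with
      | none => exact absurd ((PySem.List.max?_eq_none_iff _ _).mp hmax) hne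
      | some m => exact ⟨m, rfl⟩
    have hmem : mx ∈ arr := PySem.List.max?_mem hm
    obtain ⟨idx, hi⟩ : ∃ idx, PySem.List.index? arr mx = some idx := by
      cases hidx : PySem.List.index? arr mx with
      | none => exact absurd ((PySem.List.index?_eq_none_iff _ _).mp hidx) (not_not_intro hmem)
      | some i => exact ⟨i, rfl⟩
    obtain ⟨pre, suf, harr, hplen, hnotmem⟩ := (PySem.List.index?_eq_some_iff _ _ _).mp hi
    have hmax : ∀ y ∈ arr, y ≤ mx := by
      intro y hy; simpa using PySem.List.max?_isMax hm y hy
    have hpre : ∀ y ∈ pre, y < mx := by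
      intro y hy
      have hne' : y ≠ mx := fun h => hnotmem (h ▸ hy)
      exact lt_of_le_of_ne (hmax y (by simp [harr, hy])) hne'
    have hsuf : ∀ y ∈ suf, y ≤ mx := fun y hy => hmax y (by simp [harr, hy])
    have hslice : PySem.List.slice arr none (some (idx : Int)) = pre := by
      rw [PySem.List.slice_to_natCast, harr, ← hplen, List.take_left]
    have hsplit : bCount arr none 0 = bCount pre none 0 + 1 := by
      rw [harr]; exact bCount_split pre mx suf none 0 hpre hsuf (by intro c hc; cases hc)
    simp only [gamingLoopA, hm, hi, hslice]
    by_cases hpe : pre = []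
    · subst hpe
      simp only [List.length_nil, gt_iff_lt, Nat.lt_irrefl, if_false]
      have : bCount arr none 0 = 1 := by simpa [bCount] using hsplit
      simp [this]
    · have hlt : 0 < pre.length := List.length_pos_iff.mpr hpe
      rw [if_pos hlt]
      have hlen' : pre.length < fuel := by
        have : arr.length = pre.length + suf.length + 1 := by simp [harr]; omega
        omega
      rw [ih pre _ hlen' hpe (by rcases hp with h | h <;> simp [h])]
      rcases hp with h | h <;> subst h <;>
        · simp only [hsplit]
          rcases Nat.even_or_odd (bCount pre none 0) with he | ho
          · have h1 : bCount pre none 0 % 2 = 0 := Nat.even_iff.mp he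
            have h2 : (bCount pre none 0 + 1) % 2 = 1 := by omega
            simp [h1, h2]
          · have h1 : bCount pre none 0 % 2 = 1 := Nat.odd_iff.mp ho
            have h2 : (bCount pre none 0 + 1) % 2 = 0 := by omega
            simp [h1, h2]

-- ===== VERDICT (by name: the statement is the Claim_ definition above) =====
theorem gaming_array1_spec : Claim_equal_gaming_array1 := by
  unfold Claim_equal_gaming_array1
  intro arr _
  unfold Spec_gaming_array1 gaming_array1 gaming_array1_alt
  cases arr with
  | nil => simp [bCount]
  | cons x xs =>
    simp only [List.isEmpty_cons, List.length_cons, Bool.false_or]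
    rw [if_neg (by simp)]
    rw [loopA_eq (xs.length + 1 + 1) (x :: xs) "BOB" (by simp) (by simp) (Or.inl rfl)]
    have hk : 1 ≤ bCount (x :: xs) none 0 := by
      simp only [bCount]
      exact bCount_le xs (some x) 1
    rcases Nat.even_or_odd (bCount (x :: xs) none 0) with he | ho
    · have h1 : bCount (x :: xs) none 0 % 2 = 0 := Nat.even_iff.mp he
      simp [h1, Nat.ne_of_gt hk]
    · have h1 : bCount (x :: xs) none 0 % 2 = 1 := Nat.odd_iff.mp ho
      simp [h1]
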